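-- pv_equiv track=rewrite | github.com/gemial/mipt_lec_20-21 | lec22/bfs_parent.py | bfs
-- ===== SOURCE A (Python) =====
-- from queue import Queue
--
-- def bfs(G, start):
--     path = {v: None for v in G}
--
--     q = Queue()
--     q.put(start)
--     path[start] = ['A']
--
--     while not q.empty():
--         v = q.get()
--         for neighbor in G[v]:
--             if path[neighbor] is None:
--                 q.put(neighbor)
--                 path[neighbor] = path[v] + [neighbor]
--     return path
-- ===== SOURCE B (Python) =====
-- def bfs(G, start):
--     # BFS keeping only parent pointers and discovery order, then one DP pass
--     # rebuilds the full path lists.  (Return value only; same as A's.)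
--     parent = {start: start}
--     q = [start]          # q doubles as the discovery order
--     i = 0
--     while i < len(q):
--         v = q[i]
--         i += 1
--         for nb in G[v]:
--             if nb not in parent:
--                 parent[nb] = v
--                 q.append(nb)
--     paths = {u: None for u in G}
--     for w in q:
--         paths[w] = ['A'] if w == start else paths[parent[w]] + [w]
--     return paths
-- ===== Notes on version B (the rewrite author's own statement) =====
-- stated objective: alternative
-- what changed: B runs BFS keeping only parent pointers and the discovery order (plain list as queue instead of Queue plus full path lists), then rebuilds every path list in one post-pass from the parent map.
import Mathlib
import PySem

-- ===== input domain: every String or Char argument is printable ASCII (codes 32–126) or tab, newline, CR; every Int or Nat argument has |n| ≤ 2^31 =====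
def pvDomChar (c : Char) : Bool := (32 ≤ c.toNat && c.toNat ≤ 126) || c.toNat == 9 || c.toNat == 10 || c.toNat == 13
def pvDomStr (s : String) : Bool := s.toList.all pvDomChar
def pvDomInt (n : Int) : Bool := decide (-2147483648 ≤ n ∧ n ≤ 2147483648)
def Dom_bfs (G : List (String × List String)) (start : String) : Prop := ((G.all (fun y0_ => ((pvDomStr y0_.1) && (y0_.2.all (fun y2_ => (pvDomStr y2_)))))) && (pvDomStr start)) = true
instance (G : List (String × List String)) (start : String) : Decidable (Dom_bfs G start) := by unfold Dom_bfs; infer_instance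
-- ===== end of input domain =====

-- B replaces A's queue of full path lists (and the Queue class) by a plain BFS over
-- parent pointers followed by one pass that rebuilds the path lists; return value only
-- (neither version mutates its arguments).

-- ===== PORT A =====
-- A's while loop, one fuel unit per dequeue; the fuel is an upper bound on the number of
-- dequeues (every vertex is enqueued at most once), so inside Pre_ the loop always ends
-- by emptying the queue.  Python's 'path[neighbor]'/'path[v]'/'G[v]' raise KeyError on a
-- missing key (excluded by Pre_); the port totalises those lookups with getD.
def bfsLoopA (G : PySem.Dict String (List String)) :
    Nat → PySem.Dict String (Option (List String)) → List String →
    PySem.Dict String (Option (List String))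
  | 0, path, _ => path
  | _, path, [] => path
  | fuel + 1, path, v :: rest =>
    let s := (G.getD v []).foldl
      (fun (s : PySem.Dict String (Option (List String)) × List String) neighbor =>
        if s.1.getD neighbor none = none then
          (s.1.insert neighbor (some ((s.1.getD v none).getD [] ++ [neighbor])),
           s.2 ++ [neighbor])
        else s)
      (path, rest)
    bfsLoopA G fuel s.1 s.2

def bfs (G : List (String × List String)) (start : String) : List (String × Option (List String)) :=
  let d := PySem.Dict.ofList G
  let path : PySem.Dict String (Option (List String)) :=
    d.keys.foldl (fun p v => p.insert v none) PySem.Dict.empty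
  let path := path.insert start (some ["A"])
  (bfsLoopA d (G.length + (G.map (fun p => p.2.length)).sum + 1) path [start]).items

-- ===== PORT B =====
-- B's while loop over the growing list q (read position i), one fuel unit per iteration
-- (same bound as in port A); 'G[v]' totalised with getD as in port A.
def bfsLoopB (G : PySem.Dict String (List String)) :
    Nat → PySem.Dict String String → List String → Nat →
    PySem.Dict String String × List String
  | 0, parent, q, _ => (parent, q)
  | fuel + 1, parent, q, i =>
    if i < q.length then
      let v := q.getD i ""
      let s := (G.getD v []).foldl
        (fun (s : PySem.Dict String String × List String) nb =>
          if s.1.contains nb = false then (s.1.insert nb v, s.2 ++ [nb]) else s)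
        (parent, q)
      bfsLoopB G fuel s.1 s.2 (i + 1)
    else (parent, q)

def bfs_alt (G : List (String × List String)) (start : String) : List (String × Option (List String)) :=
  let d := PySem.Dict.ofList G
  let pq := bfsLoopB d (G.length + (G.map (fun p => p.2.length)).sum + 1)
              (PySem.Dict.empty.insert start start) [start] 0
  let paths0 : PySem.Dict String (Option (List String)) :=
    d.keys.foldl (fun p u => p.insert u none) PySem.Dict.empty
  (pq.2.foldl
    (fun m w =>
      m.insert w (some (if w = start then ["A"]
                        else (m.getD (pq.1.getD w w) none).getD [] ++ [w])))
    paths0).items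

-- ===== PRECONDITION & SPEC =====
-- reachStep/reachIter: the standard monotone transitive-closure sweep (no queue, no
-- paths — not either port's algorithm) used only to STATE the exact crash set of A.
def reachStep (items : List (String × List String)) (R : List String) : List String :=
  items.foldl
    (fun acc p =>
      if p.1 ∈ acc then
        p.2.foldl (fun a nb => if nb ∈ a then a else a ++ [nb]) acc
      else acc) R

def reachIter (items : List (String × List String)) : Nat → List String → List String
  | 0, R => R
  | n + 1, R => reachIter items n (reachStep items R)

-- Pre_: exactly the inputs on which the Python A returns (no KeyError): start is a key
-- of G, and every key vertex reachable from start has all its neighbors among G's keys;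
-- foreign neighbors on vertices unreachable from start are admitted (A returns there).
def Pre_bfs (G : List (String × List String)) (start : String) : Prop :=
  let items := (PySem.Dict.ofList G).items
  let reach := reachIter items (items.length + 1) [start]
  start ∈ items.map (·.1) ∧
  ∀ p ∈ items, p.1 ∈ reach → ∀ nb ∈ p.2, nb ∈ items.map (·.1)
instance (G : List (String × List String)) (start : String) : Decidable (Pre_bfs G start) := by unfold Pre_bfs; infer_instance

def pvWitness_bfs : (List (String × List String)) × String :=
  ([("A", ["B", "C"]), ("B", ["C"]), ("C", ["A"]), ("D", ["A", "Z"])], "A")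

def Spec_bfs (G : List (String × List String)) (start : String) (out : List (String × Option (List String))) : Prop := out = bfs_alt G start
instance (G : List (String × List String)) (start : String) (out : List (String × Option (List String))) : Decidable (Spec_bfs G start out) := by unfold Spec_bfs; infer_instance

-- ===== CLAIM (what is proved, stated in full; the proofs are below) =====
def Claim_equal_bfs : Prop := ∀ (G : List (String × List String)) (start : String), Dom_bfs G start → Pre_bfs G start → Spec_bfs G start (bfs G start)

-- ===== LEMMAS AND PROOFS =====

-- the step of B's reconstruction pass, and the pass itself ("DP"), abstracted over the
-- parent dict so the proof can speak about intermediate BFS states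
def dpStep (start : String) (parent : PySem.Dict String String)
    (m : PySem.Dict String (Option (List String))) (w : String) :
    PySem.Dict String (Option (List String)) :=
  m.insert w (some (if w = start then ["A"]
                    else (m.getD (parent.getD w w) none).getD [] ++ [w]))

def dp (start : String) (parent : PySem.Dict String String)
    (base : PySem.Dict String (Option (List String))) (order : List String) :
    PySem.Dict String (Option (List String)) :=
  order.foldl (dpStep start parent) base

lemma dp_getD_not_mem (start : String) (parent : PySem.Dict String String)
    (order : List String) (w : String) (hw : w ∉ order) :
    ∀ base, (dp start parent base order).getD w none = base.getD w none := by
  induction order with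
  | nil => intro base; rfl
  | cons x t ih =>
    intro base
    have hne : w ≠ x := fun h => hw (h ▸ List.mem_cons_self)
    have hwt : w ∉ t := fun h => hw (List.mem_cons_of_mem _ h)
    have h2 : (dpStep start parent base x).getD w none = base.getD w none :=
      PySem.Dict.getD_insert_of_ne base _ none hne
    simpa [dp, List.foldl_cons] using (ih hwt (dpStep start parent base x)).trans h2

lemma dp_getD_mem (start : String) (parent : PySem.Dict String String)
    (order : List String) (w : String) (hw : w ∈ order) :
    ∀ base, ∃ L, (dp start parent base order).getD w none = some L := by
  induction order with
  | nil => cases hw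
  | cons x t ih =>
    intro base
    by_cases hwt : w ∈ t
    · exact ih hwt _
    · have hwx : w = x := by
        rcases List.mem_cons.mp hw with h | h
        · exact h
        · exact absurd h hwt
      subst hwx
      refine ⟨if w = start then ["A"] else (base.getD (parent.getD w w) none).getD [] ++ [w], ?_⟩
      have h2 := PySem.Dict.getD_insert_self base w
        (some (if w = start then ["A"] else (base.getD (parent.getD w w) none).getD [] ++ [w])) none
      simpa [dp, List.foldl_cons, dpStep] using
        (dp_getD_not_mem start parent t w hwt (dpStep start parent base w)).trans h2

lemma dp_congr_parent (start : String) (parent parent' : PySem.Dict String String)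
    (order : List String) (base : PySem.Dict String (Option (List String)))
    (h : ∀ w ∈ order, parent'.getD w w = parent.getD w w) :
    dp start parent' base order = dp start parent base order := by
  refine PySem.List.foldl_congr_mem order _ _ base (fun m w hw => ?_)
  simp [dpStep, h w hw]

-- the lockstep invariant between A's state (path) and B's state (parent, q)
def BfsInv (start : String) (parent : PySem.Dict String String) (q : List String)
    (base path : PySem.Dict String (Option (List String))) : Prop :=
  path = dp start parent base q ∧
  (∀ w, parent.contains w = true ↔ w ∈ q) ∧
  start ∈ q ∧
  (∀ w, base.getD w none = none)

def stepA (v : String)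
    (s : PySem.Dict String (Option (List String)) × List String) (neighbor : String) :
    PySem.Dict String (Option (List String)) × List String :=
  if s.1.getD neighbor none = none then
    (s.1.insert neighbor (some ((s.1.getD v none).getD [] ++ [neighbor])), s.2 ++ [neighbor])
  else s

def stepB (v : String) (s : PySem.Dict String String × List String) (nb : String) :
    PySem.Dict String String × List String :=
  if s.1.contains nb = false then (s.1.insert nb v, s.2 ++ [nb]) else s

lemma inner_lockstep (start v : String) (ns : List String) :
    ∀ (parent : PySem.Dict String String) (q : List String)
      (base path : PySem.Dict String (Option (List String))) (j : Nat),
      BfsInv start parent q base path → v ∈ q → j ≤ q.length →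
      ns.foldl (stepA v) (path, q.drop j) =
        (dp start (ns.foldl (stepB v) (parent, q)).1 base (ns.foldl (stepB v) (parent, q)).2,
         (ns.foldl (stepB v) (parent, q)).2.drop j) ∧
      BfsInv start (ns.foldl (stepB v) (parent, q)).1 (ns.foldl (stepB v) (parent, q)).2 base
        (dp start (ns.foldl (stepB v) (parent, q)).1 base (ns.foldl (stepB v) (parent, q)).2) ∧
      v ∈ (ns.foldl (stepB v) (parent, q)).2 ∧
      j ≤ (ns.foldl (stepB v) (parent, q)).2.length := by
  induction ns with
  | nil =>
    intro parent q base path j hInv hv hj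
    obtain ⟨hpath, hmem, hstart, hbase⟩ := hInv
    exact ⟨by rw [hpath]; rfl, ⟨rfl, hmem, hstart, hbase⟩, hv, hj⟩
  | cons nb ns ih =>
    intro parent q base path j hInv hv hj
    obtain ⟨hpath, hmem, hstart, hbase⟩ := hInv
    by_cases hc : parent.contains nb = true
    · -- nb already discovered: both steps leave the state unchanged
      have hnbq : nb ∈ q := (hmem nb).mp hc
      obtain ⟨L, hL⟩ := dp_getD_mem start parent q nb hnbq base
      have hA : stepA v (path, q.drop j) nb = (path, q.drop j) := by
        simp [stepA, hpath, hL]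
      have hB : stepB v (parent, q) nb = (parent, q) := by
        simp [stepB, hc]
      rw [List.foldl_cons, List.foldl_cons, hA, hB]
      exact ih parent q base path j ⟨hpath, hmem, hstart, hbase⟩ hv hj
    · -- nb newly discovered
      have hc' : parent.contains nb = false := by
        cases h : parent.contains nb with
        | false => rfl
        | true => exact absurd h hc
      have hnbq : nb ∉ q := fun h => hc ((hmem nb).mpr h)
      have hnone : path.getD nb none = none := by
        rw [hpath, dp_getD_not_mem start parent q nb hnbq base]; exact hbase nb
      have hnbstart : nb ≠ start := fun h => hnbq (h ▸ hstart)
      have hA : stepA v (path, q.drop j) nb =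
          (path.insert nb (some ((path.getD v none).getD [] ++ [nb])), q.drop j ++ [nb]) := by
        simp [stepA, hnone]
      have hB : stepB v (parent, q) nb = (parent.insert nb v, q ++ [nb]) := by
        simp [stepB, hc']
      have hdpq : dp start (parent.insert nb v) base q = dp start parent base q := by
        refine dp_congr_parent start parent (parent.insert nb v) q base (fun w hw => ?_)
        exact PySem.Dict.getD_insert_of_ne parent v w (fun h => hnbq (h ▸ hw))
      have hdp' : dp start (parent.insert nb v) base (q ++ [nb]) =
          path.insert nb (some ((path.getD v none).getD [] ++ [nb])) := by
        simp [dp, List.foldl_append, dpStep]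
        rw [show (q.foldl (dpStep start (parent.insert nb v)) base) = dp start (parent.insert nb v) base q from rfl,
            hdpq, ← hpath]
        simp [hnbstart]
      have hdrop : (q ++ [nb]).drop j = q.drop j ++ [nb] := List.drop_append_of_le_length hj
      have hmem' : ∀ w, (parent.insert nb v).contains w = true ↔ w ∈ q ++ [nb] := by
        intro w
        rw [PySem.Dict.contains_insert]
        simp only [List.mem_append, List.mem_singleton, Bool.or_eq_true, beq_iff_eq]
        constructor
        · rintro (h | h)
          · exact Or.inr h
          · exact Or.inl ((hmem w).mp h)
        · rintro (h | h)
          · exact Or.inr ((hmem w).mpr h)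
          · exact Or.inl h
      have hInv' : BfsInv start (parent.insert nb v) (q ++ [nb]) base
          (path.insert nb (some ((path.getD v none).getD [] ++ [nb]))) :=
        ⟨hdp'.symm, hmem', List.mem_append_left _ hstart, hbase⟩
      rw [List.foldl_cons, List.foldl_cons, hA, hB, ← hdrop]
      exact ih (parent.insert nb v) (q ++ [nb]) base _ j hInv'
        (List.mem_append_left _ hv) (le_trans hj (by simp))

lemma outer_lockstep (G : PySem.Dict String (List String)) (start : String)
    (base : PySem.Dict String (Option (List String))) :
    ∀ (fuel : Nat) (parent : PySem.Dict String String) (q : List String)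
      (i : Nat) (path : PySem.Dict String (Option (List String))),
      BfsInv start parent q base path → i ≤ q.length →
      bfsLoopA G fuel path (q.drop i) =
        dp start (bfsLoopB G fuel parent q i).1 base (bfsLoopB G fuel parent q i).2 := by
  intro fuel
  induction fuel with
  | zero =>
    intro parent q i path hInv _
    exact hInv.1
  | succ fuel ih =>
    intro parent q i path hInv hi
    by_cases hlt : i < q.length
    · have hdq : q.drop i = q[i] :: q.drop (i + 1) := List.drop_eq_getElem_cons hlt
      have hvget : q.getD i "" = q[i] := List.getD_eq_getElem q "" hlt
      have hvq : q[i] ∈ q := List.getElem_mem hlt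
      have hinner := inner_lockstep start q[i] (G.getD q[i] []) parent q base path (i + 1)
        hInv hvq hlt
      obtain ⟨hfoldA, hInv', _, hlen'⟩ := hinner
      rw [hdq]
      show bfsLoopA G (fuel + 1) path (q[i] :: q.drop (i + 1)) = _
      rw [bfsLoopA, bfsLoopB]
      simp only [hlt, if_pos, hvget]
      rw [show ((G.getD q[i] []).foldl
            (fun (s : PySem.Dict String (Option (List String)) × List String) neighbor =>
              if s.1.getD neighbor none = none then
                (s.1.insert neighbor (some ((s.1.getD q[i] none).getD [] ++ [neighbor])),
                 s.2 ++ [neighbor])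
              else s) (path, q.drop (i + 1)))
          = (G.getD q[i] []).foldl (stepA q[i]) (path, q.drop (i + 1)) from rfl]
      rw [hfoldA]
      exact ih (((G.getD q[i] []).foldl (stepB q[i]) (parent, q))).1
        (((G.getD q[i] []).foldl (stepB q[i]) (parent, q))).2 (i + 1) _ hInv' hlen'
    · have hdq : q.drop i = [] := List.drop_eq_nil_of_le (le_of_not_gt hlt)
      rw [hdq]
      rw [bfsLoopB]
      simp only [hlt, if_false]
      exact hInv.1

lemma base_getD_none (ks : List String) :
    ∀ (p : PySem.Dict String (Option (List String))), (∀ w, p.getD w none = none) →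
      ∀ w, (ks.foldl (fun p v => p.insert v none) p).getD w none = none := by
  induction ks with
  | nil => intro p hp w; exact hp w
  | cons x t ih =>
    intro p hp w
    refine ih (p.insert x none) (fun w' => ?_) w
    rw [PySem.Dict.getD_insert]
    split
    · rfl
    · exact hp w'

-- ===== VERDICT (by name: the statement is the Claim_ definition above) =====
theorem bfs_spec : Claim_equal_bfs := by
  unfold Claim_equal_bfs
  intro G start _ _
  unfold Spec_bfs bfs bfs_alt
  simp only []
  set d := PySem.Dict.ofList G with hd
  set base := d.keys.foldl (fun p v => p.insert v none) PySem.Dict.empty with hbase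
  set fuel := G.length + (G.map (fun p => p.2.length)).sum + 1 with hfuel
  have hb : ∀ w, base.getD w none = none :=
    base_getD_none d.keys PySem.Dict.empty (fun w => PySem.Dict.getD_empty w none)
  have hInv : BfsInv start (PySem.Dict.empty.insert start start) [start] base
      (base.insert start (some ["A"])) := by
    refine ⟨?_, ?_, List.mem_singleton.mpr rfl, hb⟩
    · simp [dp, dpStep]
    · intro w
      rw [PySem.Dict.contains_insert, PySem.Dict.contains_empty]
      simp only [Bool.or_false, beq_iff_eq, List.mem_singleton]
  have h := outer_lockstep d start base fuel (PySem.Dict.empty.insert start start)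
    [start] 0 (base.insert start (some ["A"])) hInv (by simp)
  exact congrArg PySem.Dict.items h
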